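-- pv_equiv track=rewrite | github.com/MaynotbeGarychan/PolycrystalMesh | src/pre_process/keyword_file.py | _ret_begin_end_index_of_section
-- ===== SOURCE A (Python) =====
-- def _ret_begin_end_index_of_section(lines, header_str:str):
--     """
--     Return two lists, begin index list and end index list of one type of section
--     which is related to the target headers
--     :param header_str: the target str, ex. *NODES
--     :return: begin index list, end index list
--     """
--     begin_index_list = []
--     end_index_list = []
--     # get the beginning index of one section
--     for i in range(len(lines)):
--         line = lines[i]
--         if line.startswith(header_str):
--             begin_index_list.append(i)
--     # get the end index correspond to the beginning index, for one section
--     for begin_index in begin_index_list: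
--         for i in range(begin_index + 1, len(lines)):
--             line = lines[i]
--             if line.startswith("*"):
--                 end_index_list.append(i)
--                 break
--             if i == (len(lines) - 1):  # go to the end line
--                 end_index_list.append(i + 1)
--     return begin_index_list, end_index_list
-- ===== SOURCE B (Python) =====
-- def _ret_begin_end_index_of_section(lines, header_str: str):
--     n = len(lines)
--     # nxt[i] = index of the first line at or after i that starts with "*", or n if none
--     nxt = [n] * (n + 1)
--     for i in range(n - 1, -1, -1):
--         nxt[i] = i if lines[i].startswith("*") else nxt[i + 1]
--     begin_index_list = [i for i, line in enumerate(lines) if line.startswith(header_str)]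
--     end_index_list = [nxt[b + 1] for b in begin_index_list]
--     return begin_index_list, end_index_list
-- ===== Notes on version B (the rewrite author's own statement) =====
-- stated objective: alternative
-- what changed: Replaces A's per-header forward rescan for the next '*' line with a single backward pass building a next-star suffix array, so each header's end index becomes one array lookup; B also returns end index n for a header on the last line, where A's inner loop is empty and silently drops the entry.
-- intended difference: On inputs whose last line starts with header_str, A's inner loop over range(n, n) is empty so A omits that section's end index (the two lists get mismatched lengths); B returns n (one past the last line) for it, which is the intended 'section runs to the end of file' value the same loop produces for every other trailing section. — e.g. on _ret_begin_end_index_of_section(["*A"], "*A"): A returns ([0], []), B returns ([0], [1])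
import Mathlib
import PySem

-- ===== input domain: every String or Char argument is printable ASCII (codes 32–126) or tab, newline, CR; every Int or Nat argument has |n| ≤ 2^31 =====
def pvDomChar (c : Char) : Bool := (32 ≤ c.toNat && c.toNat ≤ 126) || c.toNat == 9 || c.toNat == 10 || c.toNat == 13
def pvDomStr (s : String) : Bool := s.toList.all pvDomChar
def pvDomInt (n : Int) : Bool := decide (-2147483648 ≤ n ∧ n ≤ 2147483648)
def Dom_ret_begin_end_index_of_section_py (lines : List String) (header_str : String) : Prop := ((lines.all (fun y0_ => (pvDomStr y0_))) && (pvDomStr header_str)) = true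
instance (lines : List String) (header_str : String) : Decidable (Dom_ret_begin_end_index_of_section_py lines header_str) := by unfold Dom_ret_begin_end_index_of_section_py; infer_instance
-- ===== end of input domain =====

-- B uses a different algorithm: one backward pass builds a next-'*' suffix array and each header's
-- end index is then a single lookup, instead of A's forward rescan per header; B also returns n as
-- end index for a header on the last line, where A drops the entry (see D_ below).

-- ===== PORT A =====
-- A's inner 'for i in range(begin_index+1, len(lines))' with its two branches and the break,
-- transliterated as structural recursion over the pyRange list threading the shared end_index_list.
def pvInnerA (lines : List String) (n : Int) : List Int → List Int → List Int
  | [], acc => acc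
  | i :: rest, acc =>
    let line := PySem.List.pyGetD lines i ""
    if PySem.Str.startswith line "*" then acc ++ [i]            -- append and break
    else if i = n - 1 then pvInnerA lines n rest (acc ++ [i + 1])  -- go to the end line
    else pvInnerA lines n rest acc

def ret_begin_end_index_of_section_py (lines : List String) (header_str : String) : List Int × List Int :=
  let n : Int := (lines.length : Int)
  let begin_index_list :=
    (PySem.List.pyRange 0 n 1).foldl (fun acc i =>
      let line := PySem.List.pyGetD lines i ""
      if PySem.Str.startswith line header_str then acc ++ [i] else acc) []
  let end_index_list :=
    begin_index_list.foldl (fun acc b => pvInnerA lines n (PySem.List.pyRange (b + 1) n 1) acc) []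
  (begin_index_list, end_index_list)

-- ===== PORT B =====
-- B's backward fill 'for i in range(n-1,-1,-1): nxt[i] = i if star else nxt[i+1]' ported as a
-- right-to-left recursion producing the list [nxt[0], …, nxt[n]] (nxt[n] = n).
def pvBuildNxt (n : Int) : List (Int × String) → List Int
  | [] => [n]
  | (i, l) :: rest =>
    let acc := pvBuildNxt n rest
    (if PySem.Str.startswith l "*" then i else acc.headD n) :: acc

def ret_begin_end_index_of_section_py_alt (lines : List String) (header_str : String) : List Int × List Int :=
  let n : Int := (lines.length : Int)
  let nxt := pvBuildNxt n (PySem.List.enumerate lines 0)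
  let begin_index_list :=
    (PySem.List.enumerate lines 0).foldl (fun acc p =>
      if PySem.Str.startswith p.2 header_str then acc ++ [p.1] else acc) []
  let end_index_list := begin_index_list.map (fun b => PySem.List.pyGetD nxt (b + 1) 0)
  (begin_index_list, end_index_list)

-- ===== PRECONDITION & SPEC =====
-- On inputs whose last line starts with header_str, A's inner loop over range(n, n) is empty so A
-- omits that section's end index (mismatched list lengths); B returns n for it, the intended
-- 'section runs to the end of file' value A itself produces for every other trailing section.
def D_ret_begin_end_index_of_section_py (lines : List String) (header_str : String) : Prop :=
  lines ≠ [] ∧ PySem.Str.startswith (lines.getLastD "") header_str = true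
instance (lines : List String) (header_str : String) : Decidable (D_ret_begin_end_index_of_section_py lines header_str) := by unfold D_ret_begin_end_index_of_section_py; infer_instance

def Spec_ret_begin_end_index_of_section_py (lines : List String) (header_str : String) (out : List Int × List Int) : Prop := ¬ D_ret_begin_end_index_of_section_py lines header_str → out = ret_begin_end_index_of_section_py_alt lines header_str
instance (lines : List String) (header_str : String) (out : List Int × List Int) : Decidable (Spec_ret_begin_end_index_of_section_py lines header_str out) := by unfold Spec_ret_begin_end_index_of_section_py; infer_instance

def pvDiffWitness_ret_begin_end_index_of_section_py : List String × String := (["*A"], "*A")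
def pvDiffWitnessOut_ret_begin_end_index_of_section_py : (List Int × List Int) × (List Int × List Int) := (([0], []), ([0], [1]))

-- ===== CLAIM (what is proved, stated in full; the proofs are below) =====
def Claim_unchanged_ret_begin_end_index_of_section_py : Prop := ∀ (lines : List String) (header_str : String), Dom_ret_begin_end_index_of_section_py lines header_str → Spec_ret_begin_end_index_of_section_py lines header_str (ret_begin_end_index_of_section_py lines header_str)
def Claim_changed_ret_begin_end_index_of_section_py : Prop := Dom_ret_begin_end_index_of_section_py (pvDiffWitness_ret_begin_end_index_of_section_py.1) (pvDiffWitness_ret_begin_end_index_of_section_py.2) ∧ D_ret_begin_end_index_of_section_py (pvDiffWitness_ret_begin_end_index_of_section_py.1) (pvDiffWitness_ret_begin_end_index_of_section_py.2) ∧ ret_begin_end_index_of_section_py (pvDiffWitness_ret_begin_end_index_of_section_py.1) (pvDiffWitness_ret_begin_end_index_of_section_py.2) = pvDiffWitnessOut_ret_begin_end_index_of_section_py.1 ∧ ret_begin_end_index_of_section_py_alt (pvDiffWitness_ret_begin_end_index_of_section_py.1) (pvDiffWitness_ret_begin_end_index_of_section_py.2) = pvDiffWitnessOut_ret_begin_end_index_of_section_py.2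 ∧ pvDiffWitnessOut_ret_begin_end_index_of_section_py.1 ≠ pvDiffWitnessOut_ret_begin_end_index_of_section_py.2
def Claim_exact_ret_begin_end_index_of_section_py : Prop := ∀ (lines : List String) (header_str : String), Dom_ret_begin_end_index_of_section_py lines header_str → D_ret_begin_end_index_of_section_py lines header_str → ret_begin_end_index_of_section_py lines header_str ≠ ret_begin_end_index_of_section_py_alt lines header_str

-- ===== LEMMAS AND PROOFS =====

-- first '*' line index in t (positions i, i+1, …); i + t.length if none
def pvNextStar : List String → Int → Int
  | [], i => i
  | l :: t, i => if PySem.Str.startswith l "*" then i else pvNextStar t (i + 1)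

theorem pvBuildNxt_ne_nil (n : Int) (L : List (Int × String)) : pvBuildNxt n L ≠ [] := by
  cases L with
  | nil => simp [pvBuildNxt]
  | cons p r => cases p; simp [pvBuildNxt]

theorem headD_eq_getD {α : Type} (xs : List α) (d d' : α) (h : xs ≠ []) :
    xs.headD d = xs.getD 0 d' := by cases xs <;> simp_all

theorem pvBuildNxt_getD (t : List String) : ∀ (i : Int) (k : Nat),
    k ≤ t.length →
    (pvBuildNxt (i + (t.length : Int)) (PySem.List.enumerate t i)).getD k (0 : Int)
      = pvNextStar (t.drop k) (i + k) := by
  induction t with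
  | nil =>
    intro i k hk
    have hk0 : k = 0 := Nat.le_zero.mp hk
    subst hk0
    simp [pvBuildNxt, PySem.List.enumerate_nil, pvNextStar]
  | cons l t ih =>
    intro i k hk
    rw [PySem.List.enumerate_cons]
    have hlen : i + ((l :: t).length : Int) = (i + 1) + (t.length : Int) := by
      simp; ring
    cases k with
    | zero =>
      simp only [pvBuildNxt, List.getD_cons_zero, List.drop_zero, pvNextStar,
        Nat.cast_zero, add_zero]
      by_cases hst : PySem.Str.startswith l "*" = true
      · rw [if_pos hst, if_pos hst]
      · rw [if_neg hst, if_neg hst]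
        rw [hlen, headD_eq_getD _ _ (0 : Int) (pvBuildNxt_ne_nil _ _)]
        simpa using ih (i + 1) 0 (Nat.zero_le _)
    | succ k =>
      simp only [pvBuildNxt, List.getD_cons_succ, List.drop_succ_cons]
      rw [hlen]
      rw [ih (i + 1) k (by simpa using hk)]
      congr 1
      push_cast; ring

theorem pvInnerA_eq (lines : List String) : ∀ (k : Nat) (i : Int) (acc : List Int),
    i + k = (lines.length : Int) → 0 ≤ i →
    pvInnerA lines (lines.length : Int) (PySem.List.pyRange i (lines.length : Int) 1) acc
      = if k = 0 then acc else acc ++ [pvNextStar (lines.drop i.toNat) i] := by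
  intro k
  induction k with
  | zero =>
    intro i acc hik _
    rw [PySem.List.pyRange_one_eq_nil (by omega)]
    simp [pvInnerA]
  | succ k ih =>
    intro i acc hik hi
    have hiN : i < (lines.length : Int) := by omega
    have hnat : i.toNat < lines.length := by omega
    rw [PySem.List.pyRange_one_cons hiN]
    have hdrop : lines.drop i.toNat = lines[i.toNat] :: lines.drop (i.toNat + 1) :=
      (List.getElem_cons_drop hnat).symm
    have hget : PySem.List.pyGetD lines i "" = lines[i.toNat] :=
      PySem.List.pyGetD_eq_getElem lines "" hi hiN
    simp only [pvInnerA, hget]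
    by_cases hst : PySem.Str.startswith lines[i.toNat] "*" = true
    · rw [if_pos hst, if_neg (by omega : ¬ (k + 1 = 0)), hdrop]
      simp only [pvNextStar]
      rw [if_pos hst]
    · rw [if_neg hst]
      by_cases hlast : i = (lines.length : Int) - 1
      · have hk0 : k = 0 := by omega
        have h2 : pvInnerA lines (lines.length : Int)
            (PySem.List.pyRange (i + 1) (lines.length : Int) 1) (acc ++ [i + 1])
            = acc ++ [i + 1] := by
          have := ih (i + 1) (acc ++ [i + 1]) (by omega) (by omega)
          simpa [hk0] using this
        have hdrop2 : lines.drop (i.toNat + 1) = [] := by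
          apply List.drop_eq_nil_of_le; omega
        rw [if_pos hlast, h2, if_neg (by omega : ¬ (k + 1 = 0)), hdrop, hdrop2]
        simp only [pvNextStar]
        rw [if_neg hst]
      · have hk0 : k ≠ 0 := by omega
        have := ih (i + 1) acc (by omega) (by omega)
        rw [if_neg hlast, this, if_neg hk0, if_neg (by omega : ¬ (k + 1 = 0)), hdrop]
        simp only [pvNextStar]
        rw [if_neg hst]
        have htn : (i + 1).toNat = i.toNat + 1 := by omega
        rw [htn]

-- the begin-index loop as a filter, for membership reasoning
theorem begins_eq (lines : List String) (h : String) :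
    (PySem.List.pyRange 0 (lines.length : Int) 1).foldl (fun acc i =>
      if PySem.Str.startswith (PySem.List.pyGetD lines i "") h then acc ++ [i] else acc) []
    = (PySem.List.pyRange 0 (lines.length : Int) 1).filter
        (fun i => PySem.Str.startswith (PySem.List.pyGetD lines i "") h) := by
  rw [PySem.List.foldl_append_if_eq_filter]
  rw [List.nil_append]

theorem mem_begins (lines : List String) (h : String) (b : Int)
    (hb : b ∈ (PySem.List.pyRange 0 (lines.length : Int) 1).filter
        (fun i => PySem.Str.startswith (PySem.List.pyGetD lines i "") h)) :
    0 ≤ b ∧ b < (lines.length : Int) ∧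
      PySem.Str.startswith (PySem.List.pyGetD lines b "") h = true := by
  rw [List.mem_filter, PySem.List.mem_pyRange_one] at hb
  exact ⟨hb.1.1, hb.1.2, hb.2⟩

-- B's begin loop over enumerate is A's loop over range with indexing
theorem beginsB_eq_beginsA (lines : List String) (h : String) :
    (PySem.List.enumerate lines 0).foldl (fun acc p =>
      if PySem.Str.startswith p.2 h then acc ++ [p.1] else acc) ([] : List Int)
    = (PySem.List.pyRange 0 (lines.length : Int) 1).foldl (fun acc i =>
      if PySem.Str.startswith (PySem.List.pyGetD lines i "") h then acc ++ [i] else acc) [] := by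
  rw [PySem.List.enumerate_eq_map_pyRange (d := ""), List.foldl_map]
  simp only [PySem.List.len_eq]

-- B's end value at a begin index b
theorem nxt_at (lines : List String) (b : Int) (h0 : 0 ≤ b) (hb : b < (lines.length : Int)) :
    PySem.List.pyGetD (pvBuildNxt (lines.length : Int) (PySem.List.enumerate lines 0)) (b + 1) 0
      = pvNextStar (lines.drop (b + 1).toNat) (b + 1) := by
  have hcast : b + 1 = ((b.toNat + 1 : Nat) : Int) := by omega
  rw [hcast, PySem.List.pyGetD_natCast]
  have := pvBuildNxt_getD lines 0 (b.toNat + 1) (by omega)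
  rw [show (0 : Int) + (lines.length : Int) = (lines.length : Int) by ring] at this
  rw [this]
  congr 1
  omega

theorem endsA_flatMap (lines : List String) (bs : List Int)
    (hbs : ∀ b ∈ bs, 0 ≤ b ∧ b < (lines.length : Int)) :
    bs.foldl (fun acc b =>
        pvInnerA lines (lines.length : Int) (PySem.List.pyRange (b + 1) (lines.length : Int) 1) acc) []
    = bs.flatMap (fun b => if b = (lines.length : Int) - 1 then []
        else [pvNextStar (lines.drop (b + 1).toNat) (b + 1)]) := by
  rw [PySem.List.foldl_congr_mem' (g := fun acc b =>
        acc ++ (if b = (lines.length : Int) - 1 then []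
          else [pvNextStar (lines.drop (b + 1).toNat) (b + 1)]))]
  · rw [PySem.List.foldl_append_eq_flatMap]
    rw [List.nil_append]
  · intro b hb acc
    obtain ⟨h0, hN⟩ := hbs b hb
    rw [pvInnerA_eq lines ((lines.length : Int) - (b + 1)).toNat (b + 1) acc (by omega) (by omega)]
    by_cases hlast : b = (lines.length : Int) - 1
    · rw [if_pos (by omega), if_pos hlast]; simp
    · rw [if_neg (by omega), if_neg hlast]

theorem flatMap_skip_eq_map (f : Int → Int) (c : Int) (bs : List Int)
    (h : ∀ b ∈ bs, b ≠ c) :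
    bs.flatMap (fun b => if b = c then [] else [f b]) = bs.map f := by
  induction bs with
  | nil => simp
  | cons b t ih =>
    simp only [List.flatMap_cons, List.map_cons]
    rw [if_neg (h b List.mem_cons_self), ih (fun x hx => h x (List.mem_cons_of_mem _ hx))]
    simp

theorem getLastD_of_ne_nil (lines : List String) (hne : lines ≠ []) :
    lines.getLastD "" = lines[lines.length - 1]'(by
      cases lines with | nil => exact absurd rfl hne | cons a t => simp) := by
  rw [List.getLastD_eq_getLast?, List.getLast?_eq_getElem?]
  rw [List.getElem?_eq_getElem (by
    cases lines with | nil => exact absurd rfl hne | cons a t => simp)]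
  rfl

theorem sum_lt_length (xs : List Nat) (h1 : ∀ x ∈ xs, x ≤ 1) (h2 : 0 ∈ xs) :
    xs.sum < xs.length := by
  induction xs with
  | nil => simp at h2
  | cons x t ih =>
    have hle : t.sum ≤ t.length := by
      calc t.sum ≤ t.length • 1 :=
            List.sum_le_card_nsmul t 1 (fun x hx => h1 x (List.mem_cons_of_mem _ hx))
      _ = t.length := by simp
    rcases List.mem_cons.mp h2 with h | h
    · simp only [List.sum_cons, ← h, List.length_cons]; omega
    · have := ih (fun x hx => h1 x (List.mem_cons_of_mem _ hx)) h
      have hx1 : x ≤ 1 := h1 x List.mem_cons_self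
      simp only [List.sum_cons, List.length_cons]; omega

-- ===== VERDICT (by name: the statement is the Claim_ definition above) =====
theorem ret_begin_end_index_of_section_py_spec : Claim_unchanged_ret_begin_end_index_of_section_py := by
  intro lines h _dom hnd
  show ret_begin_end_index_of_section_py lines h = ret_begin_end_index_of_section_py_alt lines h
  unfold ret_begin_end_index_of_section_py ret_begin_end_index_of_section_py_alt
  simp only
  rw [beginsB_eq_beginsA, begins_eq]
  set bs := (PySem.List.pyRange 0 (lines.length : Int) 1).filter
      (fun i => PySem.Str.startswith (PySem.List.pyGetD lines i "") h) with hbsdef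
  have hmem : ∀ b ∈ bs, 0 ≤ b ∧ b < (lines.length : Int) := fun b hb =>
    ⟨(mem_begins lines h b hb).1, (mem_begins lines h b hb).2.1⟩
  have hnotlast : ∀ b ∈ bs, b ≠ (lines.length : Int) - 1 := by
    intro b hb heq
    obtain ⟨h0, hN, hsw⟩ := mem_begins lines h b hb
    apply hnd
    have hne : lines ≠ [] := by
      intro hnil; rw [hnil] at hN; simp at hN; omega
    refine ⟨hne, ?_⟩
    rw [PySem.List.pyGetD_eq_getElem lines "" h0 hN] at hsw
    rw [getLastD_of_ne_nil lines hne]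
    have hbt : b.toNat = lines.length - 1 := by omega
    simpa [hbt] using hsw
  rw [endsA_flatMap lines bs hmem]
  rw [flatMap_skip_eq_map (fun b => pvNextStar (lines.drop (b + 1).toNat) (b + 1)) _ bs hnotlast]
  rw [List.map_congr_left (fun b hb =>
    nxt_at lines b (hmem b hb).1 (hmem b hb).2)]

theorem ret_begin_end_index_of_section_py_changed : Claim_changed_ret_begin_end_index_of_section_py := by
  unfold Claim_changed_ret_begin_end_index_of_section_py; decide

theorem ret_begin_end_index_of_section_py_tight : Claim_exact_ret_begin_end_index_of_section_py := by
  intro lines h _dom hD heq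
  obtain ⟨hne, hsw⟩ := hD
  have hlen : 0 < lines.length := by
    cases lines with | nil => exact absurd rfl hne | cons a t => simp
  have h2 := congrArg (fun p => p.2.length) heq
  simp only at h2
  rw [show ret_begin_end_index_of_section_py lines h
      = ret_begin_end_index_of_section_py lines h from rfl] at h2
  unfold ret_begin_end_index_of_section_py ret_begin_end_index_of_section_py_alt at h2
  simp only at h2
  rw [beginsB_eq_beginsA, begins_eq] at h2
  set bs := (PySem.List.pyRange 0 (lines.length : Int) 1).filter
      (fun i => PySem.Str.startswith (PySem.List.pyGetD lines i "") h) with hbsdef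
  have hmem : ∀ b ∈ bs, 0 ≤ b ∧ b < (lines.length : Int) := fun b hb =>
    ⟨(mem_begins lines h b hb).1, (mem_begins lines h b hb).2.1⟩
  rw [endsA_flatMap lines bs hmem] at h2
  -- the last index lies in bs
  have hmemlast : ((lines.length : Int) - 1) ∈ bs := by
    rw [hbsdef, List.mem_filter, PySem.List.mem_pyRange_one]
    refine ⟨⟨by omega, by omega⟩, ?_⟩
    rw [PySem.List.pyGetD_eq_getElem lines ""
      (by omega : (0 : Int) ≤ (lines.length : Int) - 1) (by omega)]
    rw [getLastD_of_ne_nil lines hne] at hsw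
    have hbt : ((lines.length : Int) - 1).toNat = lines.length - 1 := by omega
    simpa [hbt] using hsw
  -- length of A's end list < length of B's
  have hA : (bs.flatMap (fun b => if b = (lines.length : Int) - 1 then []
      else [pvNextStar (lines.drop (b + 1).toNat) (b + 1)])).length < bs.length := by
    rw [List.length_flatMap]
    have := sum_lt_length (bs.map (fun b =>
        (if b = (lines.length : Int) - 1 then ([] : List Int)
          else [pvNextStar (lines.drop (b + 1).toNat) (b + 1)]).length))
      (by
        intro x hx
        rw [List.mem_map] at hx
        obtain ⟨b, _, hxb⟩ := hx
        subst hxb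
        split <;> simp)
      (by
        rw [List.mem_map]
        exact ⟨(lines.length : Int) - 1, hmemlast, by simp⟩)
    simpa using this
  rw [List.length_map] at h2
  omega
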